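-- pv_equiv track=rewrite | github.com/linhdvu14/cp-sols | sols/CodeForces/1861_edu/D_Sorting_By_Multiplication.py | solve
-- ===== SOURCE A (Python) =====
-- def solve(N, A):
--     # L[i] = how many A[j] >= A[j - 1] for j <= i
--     L = [0] * (N + 1)
--     for i in range(1, N):
--         L[i] = L[i - 1]
--         if A[i] >= A[i - 1]: L[i] += 1
--
--     # R[i] = how many A[j] >= A[j + 1] for j >= i
--     R = [0] * (N + 1)
--     for i in range(N - 2, -1, -1):
--         R[i] = R[i + 1]
--         if A[i] >= A[i + 1]: R[i] += 1
--
--     # make A[..i-1] negative, A[i..] positive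
--     res = R[0]
--     for i in range(1, N):
--         res = min(res, L[i - 1] + 1 + R[i])
--
--     return res
-- ===== SOURCE B (Python) =====
-- def solve(N, A):
--     # one streaming pass with running ascent/descent counters; no auxiliary arrays
--     right = sum(A[i] >= A[i + 1] for i in range(N - 1))
--     res, left = right, 0
--     for i in range(1, N):
--         right -= A[i - 1] >= A[i]
--         res = min(res, left + 1 + right)
--         left += A[i] >= A[i - 1]
--     return res
-- ===== Notes on version B (the rewrite author's own statement) =====
-- stated objective: simpler
-- what changed: Replaced the three array-building passes (prefix table L, suffix table R, then a min scan) by one closed-form descent count plus a single streaming loop that maintains running left/right counters, using no auxiliary arrays.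
import Mathlib
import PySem

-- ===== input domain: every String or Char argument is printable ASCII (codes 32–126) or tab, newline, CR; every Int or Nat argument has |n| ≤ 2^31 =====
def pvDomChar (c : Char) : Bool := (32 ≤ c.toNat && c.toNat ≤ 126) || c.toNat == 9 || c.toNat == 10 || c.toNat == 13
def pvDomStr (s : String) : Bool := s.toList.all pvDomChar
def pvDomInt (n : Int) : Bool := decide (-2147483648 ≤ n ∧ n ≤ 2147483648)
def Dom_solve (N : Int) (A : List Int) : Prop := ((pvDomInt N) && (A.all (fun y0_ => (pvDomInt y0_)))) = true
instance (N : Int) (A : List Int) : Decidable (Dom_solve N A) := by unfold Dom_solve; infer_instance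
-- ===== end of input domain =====

-- B replaces A's three array-building passes by one closed-form descent count plus a single
-- streaming loop with running counters (same values, no auxiliary arrays); proved equal wherever A returns.


-- ===== PORT A =====
-- loop bodies of A's two table-building passes (L[i] = L[i-1]; if A[i] >= A[i-1]: L[i] += 1, resp. the R pass)
-- the L-loop fold function of port A, named for the proofs
def fL (A : List Int) (L : List Int) (i : Int) : List Int :=
  let L := PySem.List.pySetD L i (PySem.List.pyGetD L (i - 1) 0)
  if PySem.List.pyGetD A i 0 ≥ PySem.List.pyGetD A (i - 1) 0 then
    PySem.List.pySetD L i (PySem.List.pyGetD L i 0 + 1)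
  else L

def fR (A : List Int) (R : List Int) (i : Int) : List Int :=
  let R := PySem.List.pySetD R i (PySem.List.pyGetD R (i + 1) 0)
  if PySem.List.pyGetD A i 0 ≥ PySem.List.pyGetD A (i + 1) 0 then
    PySem.List.pySetD R i (PySem.List.pyGetD R i 0 + 1)
  else R

def solve (N : Int) (A : List Int) : Int :=
  let L0 : List Int := List.replicate (N + 1).toNat 0
  let L := (PySem.List.pyRange 1 N 1).foldl (fL A) L0
  let R0 : List Int := List.replicate (N + 1).toNat 0
  let R := (PySem.List.pyRange (N - 2) (-1) (-1)).foldl (fR A) R0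
  (PySem.List.pyRange 1 N 1).foldl (fun res i =>
      min res (PySem.List.pyGetD L (i - 1) 0 + 1 + PySem.List.pyGetD R i 0))
    (PySem.List.pyGetD R 0 0)

-- ===== PORT B =====
-- loop body of B's single streaming pass (right -= ...; res = min(res, left+1+right); left += ...)
def fB (A : List Int) (s : Int × Int × Int) (i : Int) : Int × Int × Int :=
  let right := s.2.2 - (if PySem.List.pyGetD A (i - 1) 0 ≥ PySem.List.pyGetD A i 0 then (1 : Int) else 0)
  let res := min s.1 (s.2.1 + 1 + right)
  let left := s.2.1 + (if PySem.List.pyGetD A i 0 ≥ PySem.List.pyGetD A (i - 1) 0 then (1 : Int) else 0)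
  (res, left, right)

def solve_alt (N : Int) (A : List Int) : Int :=
  let right0 : Int := ((PySem.List.pyRange 0 (N - 1) 1).map (fun i =>
      if PySem.List.pyGetD A i 0 ≥ PySem.List.pyGetD A (i + 1) 0 then (1 : Int) else 0)).sum
  let s := (PySem.List.pyRange 1 N 1).foldl (fB A) (right0, 0, right0)
  s.1

-- ===== PRECONDITION & SPEC =====
-- Pre_ excludes exactly the inputs where the Python A raises IndexError: N < 0 (R[0] on an
-- empty list) and 2 ≤ N with len(A) < N (A[i] out of range).
def Pre_solve (N : Int) (A : List Int) : Prop := 0 ≤ N ∧ (N ≤ (A.length : Int) ∨ N ≤ 1)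
instance (N : Int) (A : List Int) : Decidable (Pre_solve N A) := by unfold Pre_solve; infer_instance
def pvWitness_solve : Int × List Int := (4, [3, 1, 2, 2])

def Spec_solve (N : Int) (A : List Int) (out : Int) : Prop := out = solve_alt N A
instance (N : Int) (A : List Int) (out : Int) : Decidable (Spec_solve N A out) := by unfold Spec_solve; infer_instance

-- ===== CLAIM (what is proved, stated in full; the proofs are below) =====
def Claim_equal_solve : Prop := ∀ (N : Int) (A : List Int), Dom_solve N A → Pre_solve N A → Spec_solve N A (solve N A)

-- ===== LEMMAS AND PROOFS =====

-- the two adjacent-comparison indicators both programs are built from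
def dscA (A : List Int) (k : Nat) : Int :=
  if PySem.List.pyGetD A (k : Int) 0 ≥ PySem.List.pyGetD A ((k : Int) + 1) 0 then 1 else 0
def ascA (A : List Int) (k : Nat) : Int :=
  if PySem.List.pyGetD A (k : Int) 0 ≥ PySem.List.pyGetD A ((k : Int) - 1) 0 then 1 else 0
-- Dp m = number of descents among positions < m; Ls m = number of ascents at positions 1..m
def Dp (A : List Int) : Nat → Int
  | 0 => 0
  | k + 1 => Dp A k + dscA A k
def Ls (A : List Int) : Nat → Int
  | 0 => 0
  | k + 1 => Ls A k + ascA A (k + 1)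



lemma getD_replicate (j : Nat) (n : Nat) : (List.replicate n (0:Int)).getD j 0 = 0 := by
  simp [List.getD, List.getElem?_replicate]
  split <;> simp

lemma fL_len (A L : List Int) (i : Int) : (fL A L i).length = L.length := by
  unfold fL
  split <;> simp [PySem.List.length_pySetD]

lemma fL_get (A L : List Int) (n : Nat) (hn : n < L.length) (j : Nat) :
    PySem.List.pyGetD (fL A L (n:Int)) (j:Int) 0 =
      if j = n then PySem.List.pyGetD L ((n:Int) - 1) 0 + ascA A n
      else PySem.List.pyGetD L (j:Int) 0 := by
  unfold fL ascA
  by_cases hc : PySem.List.pyGetD A (n:Int) 0 ≥ PySem.List.pyGetD A ((n:Int) - 1) 0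
  · simp only [hc, if_pos]
    rw [PySem.List.pyGetD_pySetD_natCast _ n j _ _ (by simp [hn]),
        PySem.List.pyGetD_pySetD_natCast _ n n _ _ hn,
        PySem.List.pyGetD_pySetD_natCast _ n j _ _ hn]
    split <;> simp
  · simp only [hc, if_false]
    rw [PySem.List.pyGetD_pySetD_natCast _ n j _ _ hn]
    split <;> simp

lemma fR_len (A R : List Int) (i : Int) : (fR A R i).length = R.length := by
  unfold fR
  split <;> simp [PySem.List.length_pySetD]

lemma fR_get (A R : List Int) (n : Nat) (hn : n < R.length) (j : Nat) :
    PySem.List.pyGetD (fR A R (n:Int)) (j:Int) 0 =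
      if j = n then PySem.List.pyGetD R ((n:Int) + 1) 0 + dscA A n
      else PySem.List.pyGetD R (j:Int) 0 := by
  unfold fR dscA
  by_cases hc : PySem.List.pyGetD A (n:Int) 0 ≥ PySem.List.pyGetD A ((n:Int) + 1) 0
  · simp only [hc, if_pos]
    rw [PySem.List.pyGetD_pySetD_natCast _ n j _ _ (by simp [hn]),
        PySem.List.pyGetD_pySetD_natCast _ n n _ _ hn,
        PySem.List.pyGetD_pySetD_natCast _ n j _ _ hn]
    split <;> simp
  · simp only [hc, if_false]
    rw [PySem.List.pyGetD_pySetD_natCast _ n j _ _ hn]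
    split <;> simp

lemma L_inv (A : List Int) (N : Int) (hN : 2 ≤ N) (m : Nat) (hm : (m:Int) ≤ N - 1) :
    (((List.range m).map (fun k : Nat => (1:Int) + (k:Int))).foldl (fL A) (List.replicate (N+1).toNat 0)).length = (N+1).toNat ∧
    ∀ j : Nat, PySem.List.pyGetD (((List.range m).map (fun k : Nat => (1:Int) + (k:Int))).foldl (fL A) (List.replicate (N+1).toNat 0)) (j:Int) 0 = if j ≤ m then Ls A j else 0 := by
  induction m with
  | zero =>
    refine ⟨by simp, fun j => ?_⟩
    simp only [List.range_zero, List.map_nil, List.foldl_nil, PySem.List.pyGetD_natCast,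
      getD_replicate]
    by_cases h : j ≤ 0
    · simp [Nat.le_zero.mp h, Ls]
    · simp [h]
  | succ m ih =>
    obtain ⟨ihlen, ihget⟩ := ih (by push_cast at hm; omega)
    rw [List.range_succ, List.map_append, List.foldl_append]
    set LF := ((List.range m).map (fun k : Nat => (1:Int) + (k:Int))).foldl (fL A) (List.replicate (N+1).toNat 0) with hLF
    have hidx : (1:Int) + (m:Nat) = ((m+1 : Nat) : Int) := by push_cast; ring
    have hlt : m + 1 < LF.length := by rw [ihlen]; push_cast at hm; omega
    have hread : PySem.List.pyGetD LF ((1:Int) + (m:Int) - 1) 0 = Ls A m := by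
      have h1 : (1:Int) + (m:Int) - 1 = ((m : Nat) : Int) := by ring
      rw [h1, ihget m]; simp
    simp only [List.map_cons, List.map_nil, List.foldl_cons, List.foldl_nil]
    rw [hidx]
    refine ⟨by rw [fL_len, ihlen], fun j => ?_⟩
    rw [fL_get A LF (m+1) hlt j]
    by_cases hj : j = m + 1
    · have h1 : ((m+1 : Nat) : Int) - 1 = ((m : Nat) : Int) := by push_cast; omega
      rw [if_pos hj, h1, ihget m, if_pos (le_refl m), hj, if_pos (le_refl (m+1))]
      simp [Ls]
    · rw [if_neg hj, ihget j]
      by_cases h2 : j ≤ m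
      · rw [if_pos h2, if_pos (by omega)]
      · rw [if_neg h2, if_neg (by omega)]

lemma R_inv (A : List Int) (N : Int) (hN : 2 ≤ N) (m : Nat) (hm : (m:Int) ≤ N - 1) :
    (((List.range m).map (fun k : Nat => (N - 2) - (k:Int))).foldl (fR A) (List.replicate (N+1).toNat 0)).length = (N+1).toNat ∧
    ∀ j : Nat, PySem.List.pyGetD (((List.range m).map (fun k : Nat => (N - 2) - (k:Int))).foldl (fR A) (List.replicate (N+1).toNat 0)) (j:Int) 0 = if N - 1 - (m:Int) ≤ (j:Int) ∧ (j:Int) ≤ N - 2 then Dp A (N-1).toNat - Dp A j else 0 := by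
  induction m with
  | zero =>
    refine ⟨by simp, fun j => ?_⟩
    simp only [List.range_zero, List.map_nil, List.foldl_nil, PySem.List.pyGetD_natCast,
      getD_replicate]
    rw [if_neg (by push_cast; omega)]
  | succ m ih =>
    obtain ⟨ihlen, ihget⟩ := ih (by push_cast at hm ⊢; omega)
    rw [List.range_succ, List.map_append, List.foldl_append]
    set RF := ((List.range m).map (fun k : Nat => (N - 2) - (k:Int))).foldl (fR A) (List.replicate (N+1).toNat 0) with hRF
    have hmN : (m:Int) + 1 ≤ N - 1 := by push_cast at hm; omega
    set nn := ((N : Int) - 2 - (m:Int)).toNat with hnn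
    have hni : (N:Int) - 2 - (m:Int) = (nn : Int) := by rw [hnn]; omega
    have hlt : nn < RF.length := by rw [ihlen]; omega
    have hsucc : ((nn : Int)) + 1 = ((nn + 1 : Nat) : Int) := by push_cast; ring
    have hval : PySem.List.pyGetD RF ((nn : Int) + 1) 0 = Dp A (N-1).toNat - Dp A (nn+1) := by
      rw [hsucc, ihget (nn+1)]
      by_cases hm0 : (1:Int) ≤ (m:Int)
      · rw [if_pos ⟨by push_cast; omega, by push_cast; omega⟩]
      · have hm00 : m = 0 := by omega
        have hnn1 : nn + 1 = (N-1).toNat := by omega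
        rw [if_neg (by push_cast; omega), hnn1, sub_self]
    simp only [List.map_cons, List.map_nil, List.foldl_cons, List.foldl_nil]
    rw [hni]
    refine ⟨by rw [fR_len, ihlen], fun j => ?_⟩
    rw [fR_get A RF nn hlt j, hval]
    by_cases hj : j = nn
    · rw [if_pos hj, if_pos (by subst hj; constructor <;> omega)]
      subst hj
      show Dp A (N-1).toNat - Dp A (nn+1) + dscA A nn = Dp A (N-1).toNat - Dp A nn
      simp only [Dp]
      ring
    · rw [if_neg hj, ihget j]
      have hjne : (j : Int) ≠ (nn : Int) := by exact_mod_cast fun h => hj (by exact_mod_cast h)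
      by_cases h2 : N - 1 - (m:Int) ≤ (j:Int) ∧ (j:Int) ≤ N - 2
      · rw [if_pos h2, if_pos (by push_cast; omega)]
      · rw [if_neg h2, if_neg (by push_cast at h2 ⊢; omega)]

lemma Dp_sum (A : List Int) (m : Nat) :
    (((List.range m).map (fun k : Nat => dscA A k))).sum = Dp A m := by
  induction m with
  | zero => simp [Dp]
  | succ m ih => rw [List.range_succ, List.map_append, List.sum_append]; simp [Dp, ih]


lemma B_inv (A : List Int) (D0 : Int) (m : Nat) :
    ((List.range m).map (fun k : Nat => (1:Int) + (k:Int))).foldl (fB A) (D0, 0, D0) =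
      ((List.range m).foldl (fun r k => min r (Ls A k + 1 + (D0 - Dp A (k+1)))) D0,
       Ls A m, D0 - Dp A m) := by
  induction m with
  | zero => simp [Ls, Dp]
  | succ m ih =>
    rw [List.range_succ, List.map_append, List.foldl_append, List.foldl_append, ih]
    simp only [List.map_cons, List.map_nil, List.foldl_cons, List.foldl_nil]
    unfold fB
    have h2 : (1:Int) + (m:Int) = ((m+1 : Nat) : Int) := by push_cast; omega
    have h3 : ((m+1 : Nat) : Int) - 1 = ((m:Nat) : Int) := by push_cast; omega
    simp only [h2, h3]
    refine Prod.ext ?_ (Prod.ext ?_ ?_)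
    · show min _ (Ls A m + 1 + (D0 - Dp A m - _)) = min _ (Ls A m + 1 + (D0 - Dp A (m+1)))
      have : D0 - Dp A m - (if PySem.List.pyGetD A ((m:Nat):Int) 0 ≥ PySem.List.pyGetD A (((m+1:Nat)):Int) 0 then (1:Int) else 0) = D0 - Dp A (m+1) := by
        simp only [Dp, dscA]
        have : (((m:Nat)):Int) + 1 = (((m+1:Nat)):Int) := by push_cast; ring
        rw [this]
        ring
      rw [this]
    · show Ls A m + _ = Ls A (m+1)
      simp only [Ls, ascA]
      rw [h3]
    · show D0 - Dp A m - _ = D0 - Dp A (m+1)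
      simp only [Dp, dscA]
      have : (((m:Nat)):Int) + 1 = (((m+1:Nat)):Int) := by push_cast; ring
      rw [this]
      ring

theorem ports_eq (N : Int) (A : List Int) : solve N A = solve_alt N A := by
  by_cases hN : N ≤ 1
  · -- all three loops are empty and both programs return 0
    unfold solve solve_alt
    rw [PySem.List.pyRange_one_eq_nil hN,
        PySem.List.pyRange_neg_one_eq_nil (by omega : N - 2 ≤ -1),
        PySem.List.pyRange_one_eq_nil (by omega : N - 1 ≤ 0)]
    simp [PySem.List.pyGetD_zero, List.getD]
  · have h2N : 2 ≤ N := by omega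
    set n := (N - 1).toNat with hn
    have hr1 : PySem.List.pyRange 1 N 1 = (List.range n).map (fun k : Nat => (1:Int) + (k:Int)) := by
      rw [PySem.List.pyRange_one]
    have hr2 : PySem.List.pyRange (N - 2) (-1) (-1) = (List.range n).map (fun k : Nat => (N - 2) - (k:Int)) := by
      rw [PySem.List.pyRange_neg_one]
      have h : (N - 2 - (-1)).toNat = n := by omega
      rw [h]
    have hr3 : PySem.List.pyRange 0 (N - 1) 1 = (List.range n).map (fun k : Nat => (0:Int) + (k:Int)) := by
      rw [PySem.List.pyRange_one]
      have h : (N - 1 - 0).toNat = n := by omega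
      rw [h]
    obtain ⟨hLlen, hLget⟩ := L_inv A N h2N n (by omega)
    obtain ⟨hRlen, hRget⟩ := R_inv A N h2N n (by omega)
    have hR0 : PySem.List.pyGetD (((List.range n).map (fun k : Nat => (N - 2) - (k:Int))).foldl (fR A) (List.replicate (N+1).toNat 0)) (0:Int) 0 = Dp A n := by
      have h0 := hRget 0
      norm_num at h0
      rw [h0, if_pos (by constructor <;> omega)]
      simp only [Dp, sub_zero]
      congr 1
      omega
    -- A's result is the common min-fold
    have hA : solve N A = (List.range n).foldl
        (fun r k => min r (Ls A k + 1 + (Dp A n - Dp A (k+1)))) (Dp A n) := by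
      unfold solve
      rw [hr1, hr2]
      dsimp only
      rw [hR0, List.foldl_map]
      apply PySem.List.foldl_congr_mem
      intro r k hk
      have hkn : k < n := List.mem_range.mp hk
      have e1 : (1:Int) + (k:Int) - 1 = ((k:Nat):Int) := by ring
      have e2 : (1:Int) + (k:Int) = ((k+1:Nat):Int) := by push_cast; ring
      rw [e1, e2, hLget k, if_pos (by omega), hRget (k+1)]
      by_cases hk2 : ((k+1:Nat):Int) ≤ N - 2
      · rw [if_pos ⟨by push_cast; omega, hk2⟩]
      · have hkn1 : k + 1 = n := by push_cast at hk2; omega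
        rw [if_neg (by push_cast at hk2 ⊢; omega), hkn1, sub_self]
    -- B's result is the same fold
    have hB : solve_alt N A = (List.range n).foldl
        (fun r k => min r (Ls A k + 1 + (Dp A n - Dp A (k+1)))) (Dp A n) := by
      unfold solve_alt
      rw [hr3]
      dsimp only
      have hsum : (((List.range n).map (fun k : Nat => (0:Int) + (k:Int))).map (fun i =>
          if PySem.List.pyGetD A i 0 ≥ PySem.List.pyGetD A (i + 1) 0 then (1:Int) else 0)).sum = Dp A n := by
        rw [List.map_map]
        have : ((fun i => if PySem.List.pyGetD A i 0 ≥ PySem.List.pyGetD A (i + 1) 0 then (1:Int) else 0) ∘ (fun k : Nat => (0:Int) + (k:Int))) = (fun k : Nat => dscA A k) := by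
          funext k
          simp only [Function.comp, dscA]
          norm_num
        rw [this, Dp_sum]
      rw [hsum, hr1, B_inv A (Dp A n) n]
    rw [hA, hB]

-- ===== VERDICT (by name: the statement is the Claim_ definition above) =====
theorem solve_spec : Claim_equal_solve := by
  intro N A _ _
  unfold Spec_solve
  exact ports_eq N A
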